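-- pv_equiv track=rewrite | github.com/saxster/DJANGO5-master | apps/core_onboarding/services/knowledge/document_processing/structure_detector.py | infer_page_number
-- ===== SOURCE A (Python) =====
-- from typing import List, Dict, Optional
--
-- def infer_page_number(position: int, page_breaks: List[Dict]) -> int:
--     """Infer page number for a given text position"""
--     page_num = 1
--     for page_break in page_breaks:
--         if page_break['position'] <= position:
--             if page_break.get('page_number'):
--                 page_num = page_break['page_number']
--             else:
--                 page_num += 1
--         else:
--             break
--     return page_num
-- ===== SOURCE B (Python) =====
-- def infer_page_number(position, page_breaks):
--     """Infer page number for a given text position"""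
--     # 1. Collect the prefix of breaks at or before the position (stop at first exceeding one).
--     prefix = []
--     for pb in page_breaks:
--         if pb['position'] > position:
--             break
--         prefix.append(pb)
--     # 2. Scan the prefix backwards for the last break carrying an explicit (truthy) page number.
--     for i in range(len(prefix) - 1, -1, -1):
--         pn = prefix[i].get('page_number')
--         if pn:
--             return pn + (len(prefix) - 1 - i)
--     # 3. No explicit page number anywhere in the prefix: each break is one page turn from page 1.
--     return 1 + len(prefix)
-- ===== Notes on version B (the rewrite author's own statement) =====
-- stated objective: alternative
-- what changed: Replaces A's single forward fold carrying a running page counter with a two-phase decomposition: build the prefix of breaks at or before the position, then scan it backwards for the last explicitly numbered break and add the count of later (unnumbered) breaks, or 1 + prefix length if none.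
import Mathlib
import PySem

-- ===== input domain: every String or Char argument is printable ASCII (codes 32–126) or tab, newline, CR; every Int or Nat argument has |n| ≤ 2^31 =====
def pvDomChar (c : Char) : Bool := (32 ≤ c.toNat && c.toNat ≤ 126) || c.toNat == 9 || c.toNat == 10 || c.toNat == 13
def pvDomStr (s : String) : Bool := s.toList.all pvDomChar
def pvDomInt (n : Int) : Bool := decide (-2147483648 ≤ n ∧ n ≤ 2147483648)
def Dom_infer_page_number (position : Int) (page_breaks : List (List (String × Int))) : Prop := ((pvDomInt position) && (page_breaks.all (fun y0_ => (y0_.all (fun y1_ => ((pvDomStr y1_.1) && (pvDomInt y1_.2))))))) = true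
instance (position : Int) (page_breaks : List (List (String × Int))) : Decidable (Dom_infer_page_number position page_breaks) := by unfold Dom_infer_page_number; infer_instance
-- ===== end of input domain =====

-- B replaces A's forward fold with a running page counter by a two-phase decomposition
-- (prefix of applicable breaks, then a backward scan for the last explicitly numbered one); alternative, not faster.

-- shared dict-lookup helper: d.get(k) / d[k] on an insertion-order association list (first match)
def pbGet? (d : List (String × Int)) (k : String) : Option Int := (PySem.Dict.mk d).get? k

-- ===== PORT A =====
-- A's loop; page_break['position'] would raise KeyError when absent — Pre_ excludes that,
-- the port totalizes the lookup with 0 there. page_break.get('page_number') is truthy iff present and ≠ 0.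
def inferLoopA (position : Int) : List (List (String × Int)) → Int → Int
  | [], page_num => page_num
  | pb :: rest, page_num =>
    if (pbGet? pb "position").getD 0 ≤ position then
      if (pbGet? pb "page_number").getD 0 ≠ 0 then
        inferLoopA position rest ((pbGet? pb "page_number").getD 0)
      else
        inferLoopA position rest (page_num + 1)
    else page_num

def infer_page_number (position : Int) (page_breaks : List (List (String × Int))) : Int :=
  inferLoopA position page_breaks 1

-- ===== PORT B =====
-- phase 1: prefix of breaks at or before position (stop at the first exceeding one);
-- pb['position'] totalized with 0 exactly as in port A (Pre_ excludes the KeyError inputs).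
def prefixB (position : Int) : List (List (String × Int)) → List (List (String × Int))
  | [] => []
  | pb :: rest =>
    if (pbGet? pb "position").getD 0 > position then []
    else pb :: prefixB position rest

-- phase 2: B's backward index loop, as a scan over the reversed prefix; k counts the breaks already passed
-- (= number of breaks after the current one in the prefix)
def revScanB : List (List (String × Int)) → Int → Option Int
  | [], _ => none
  | pb :: rest, k =>
    if (pbGet? pb "page_number").getD 0 ≠ 0 then some ((pbGet? pb "page_number").getD 0 + k)
    else revScanB rest (k + 1)

def infer_page_number_alt (position : Int) (page_breaks : List (List (String × Int))) : Int :=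
  let pre := prefixB position page_breaks
  match revScanB pre.reverse 0 with
  | some v => v
  | none => 1 + (pre.length : Int)

-- ===== PRECONDITION & SPEC =====
-- Pre_ excludes exactly the inputs where Python A raises KeyError: some break that the loop actually
-- reaches (every earlier break has a 'position' value ≤ position) lacks a 'position' key. B raises there too.
def Pre_infer_page_number (position : Int) (page_breaks : List (List (String × Int))) : Prop :=
  ∀ i ∈ List.range page_breaks.length,
    (∀ j ∈ List.range i, (pbGet? (page_breaks.getD j []) "position").getD (position + 1) ≤ position) →
    (pbGet? (page_breaks.getD i []) "position").isSome = true
instance (position : Int) (page_breaks : List (List (String × Int))) : Decidable (Pre_infer_page_number position page_breaks) := by unfold Pre_infer_page_number; infer_instance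

def pvWitness_infer_page_number : Int × (List (List (String × Int))) :=
  (5, [[("position", 1), ("page_number", 2)], [("position", 3)], [("position", 9), ("page_number", 7)]])

def Spec_infer_page_number (position : Int) (page_breaks : List (List (String × Int))) (out : Int) : Prop := out = infer_page_number_alt position page_breaks
instance (position : Int) (page_breaks : List (List (String × Int))) (out : Int) : Decidable (Spec_infer_page_number position page_breaks out) := by unfold Spec_infer_page_number; infer_instance

-- ===== CLAIM (what is proved, stated in full; the proofs are below) =====
def Claim_equal_infer_page_number : Prop := ∀ (position : Int) (page_breaks : List (List (String × Int))), Dom_infer_page_number position page_breaks → Pre_infer_page_number position page_breaks → Spec_infer_page_number position page_breaks (infer_page_number position page_breaks)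

-- ===== LEMMAS AND PROOFS =====

lemma revScanB_append (l : List (List (String × Int))) (pb : List (String × Int)) (k : Int) :
    revScanB (l ++ [pb]) k =
      match revScanB l k with
      | some v => some v
      | none =>
        if (pbGet? pb "page_number").getD 0 ≠ 0 then
          some ((pbGet? pb "page_number").getD 0 + (k + (l.length : Int)))
        else none := by
  induction l generalizing k with
  | nil => simp [revScanB]
  | cons hd tl ih =>
    simp only [List.cons_append, revScanB, List.length_cons]
    by_cases h : (pbGet? hd "page_number").getD 0 ≠ 0
    · simp only [if_pos h]
    · simp only [if_neg h, ih]
      cases htl : revScanB tl (k + 1) with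
      | some v => rfl
      | none =>
        by_cases hp : (pbGet? pb "page_number").getD 0 ≠ 0
        · simp only [if_pos hp]
          congr 1
          push_cast
          ring
        · simp only [if_neg hp]

lemma loopA_eq (position : Int) (pbs : List (List (String × Int))) (pn : Int) :
    inferLoopA position pbs pn =
      match revScanB (prefixB position pbs).reverse 0 with
      | some v => v
      | none => pn + ((prefixB position pbs).length : Int) := by
  induction pbs generalizing pn with
  | nil => simp [inferLoopA, prefixB, revScanB]
  | cons pb rest ih =>
    simp only [inferLoopA, prefixB]
    by_cases hle : (pbGet? pb "position").getD 0 ≤ position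
    · have hgt : ¬ (pbGet? pb "position").getD 0 > position := not_lt.mpr hle
      rw [if_pos hle, if_neg hgt, List.reverse_cons, revScanB_append]
      by_cases hpn : (pbGet? pb "page_number").getD 0 ≠ 0
      · rw [if_pos hpn, ih]
        cases h : revScanB (prefixB position rest).reverse 0 with
        | some v => simp
        | none => simp [hpn]
      · rw [if_neg hpn, ih]
        cases h : revScanB (prefixB position rest).reverse 0 with
        | some v => simp
        | none =>
          simp [not_not.mp hpn]
          ring
    · have hgt : (pbGet? pb "position").getD 0 > position := not_le.mp hle
      simp [if_neg hle, if_pos hgt, revScanB]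

-- ===== VERDICT (by name: the statement is the Claim_ definition above) =====
theorem infer_page_number_spec : Claim_equal_infer_page_number := by
  intro position page_breaks _ _
  show infer_page_number position page_breaks = infer_page_number_alt position page_breaks
  simp only [infer_page_number, infer_page_number_alt, loopA_eq]
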